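-- pv_equiv track=rewrite | github.com/betgws/programmers | 숫자변환하기.py | divide_by
-- ===== SOURCE A (Python) =====
-- def divide_by(a, answer):
--
--
--     while(a%2 == 0):
--         answer  = answer + 1
--         a = a // 2
--     while(a%3 == 0):
--         answer = answer + 1
--         a = a // 3
--
--     if (a != 1) :
--         return 100000001
--
--     else:
--         return answer
-- ===== SOURCE B (Python) =====
-- def divide_by(a, answer):
--     # a reaches 1 by /2 and /3 steps exactly when a = 2**i * 3**j; search for the
--     # power of 3 dividing a whose quotient is a power of two (bit test), and read
--     # off i from the quotient's bit length -- no divide-out loops.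
--     if a < 1:
--         return 100000001
--     p, j = 1, 0
--     while p <= a:
--         if a % p == 0:
--             q = a // p
--             if q & (q - 1) == 0:
--                 return answer + j + q.bit_length() - 1
--         p *= 3
--         j += 1
--     return 100000001
-- ===== Notes on version B (the rewrite author's own statement) =====
-- stated objective: alternative
-- what changed: Instead of stripping factors of 2 and then 3 in two divide-out loops, B searches the powers of 3 dividing a for one whose quotient passes the q&(q-1)==0 power-of-two bit test and reads the count of 2s off the quotient's bit_length; a=0, on which A loops forever, is excluded by Pre_.
import Mathlib
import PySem

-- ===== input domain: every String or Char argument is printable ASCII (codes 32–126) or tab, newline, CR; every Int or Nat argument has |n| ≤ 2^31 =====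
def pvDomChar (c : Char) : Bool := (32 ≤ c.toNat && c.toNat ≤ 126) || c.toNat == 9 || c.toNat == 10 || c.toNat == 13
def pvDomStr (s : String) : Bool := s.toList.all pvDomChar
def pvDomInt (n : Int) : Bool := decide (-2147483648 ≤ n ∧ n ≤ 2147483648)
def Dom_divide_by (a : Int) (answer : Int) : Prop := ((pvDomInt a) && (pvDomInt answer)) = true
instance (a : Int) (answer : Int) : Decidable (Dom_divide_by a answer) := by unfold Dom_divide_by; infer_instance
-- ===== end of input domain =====

-- B replaces A's two divide-out loops by a search over the powers of 3 dividing a, a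
-- power-of-two bit test on the quotient and a bit_length read-off; equal on Pre_ (a ≠ 0;
-- at a = 0 Python A loops forever).

-- ===== PORT A =====
-- first while-loop of A: while a % 2 == 0: answer += 1; a //= 2
-- the 'a ≠ 0' guard only makes the recursion total; Python loops forever at a = 0
def pvA2 (a : Int) (answer : Int) : Int × Int :=
  if h : a ≠ 0 ∧ PySem.Int.mod a 2 = 0 then pvA2 (PySem.Int.floordiv a 2) (answer + 1) else (a, answer)
  termination_by a.natAbs
  decreasing_by
    rw [PySem.Int.floordiv_eq_ediv_of_pos (by norm_num)]
    rw [PySem.Int.mod_eq_emod_of_pos (by norm_num)] at h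
    omega

-- second while-loop of A: while a % 3 == 0: answer += 1; a //= 3
def pvA3 (a : Int) (answer : Int) : Int × Int :=
  if h : a ≠ 0 ∧ PySem.Int.mod a 3 = 0 then pvA3 (PySem.Int.floordiv a 3) (answer + 1) else (a, answer)
  termination_by a.natAbs
  decreasing_by
    rw [PySem.Int.floordiv_eq_ediv_of_pos (by norm_num)]
    rw [PySem.Int.mod_eq_emod_of_pos (by norm_num)] at h
    omega

def divide_by (a : Int) (answer : Int) : Int :=
  let p := pvA2 a answer
  let q := pvA3 p.1 p.2
  if q.1 ≠ 1 then 100000001 else q.2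

-- ===== PORT B =====
-- Python's q.bit_length(): number of bits of |q|; exact for every int
def pyBitLength (q : Int) : Int :=
  if q.natAbs = 0 then 0 else (Nat.log2 q.natAbs : Int) + 1

-- Python's q & (q - 1): exact for q ≥ 1, the only values it is applied to
-- (q = a // p with 0 < p ≤ a); Lean's Int has no bitwise and, so we compute on toNat
def pyAndPred (q : Int) : Int := ((q.toNat &&& (q.toNat - 1) : Nat) : Int)

-- B's while-loop: while p <= a: if a % p == 0 and q&(q-1)==0: return …; p *= 3; j += 1
-- the proof argument hp only makes the recursion total; every call has p = 3^k > 0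
def pvBloop (a : Int) (answer : Int) (p : Int) (j : Int) (hp : 0 < p) : Int :=
  if p ≤ a then
    if PySem.Int.mod a p = 0 ∧ pyAndPred (PySem.Int.floordiv a p) = 0 then
      answer + j + pyBitLength (PySem.Int.floordiv a p) - 1
    else pvBloop a answer (p * 3) (j + 1) (by positivity)
  else 100000001
  termination_by (a + 1 - p).toNat
  decreasing_by omega

def divide_by_alt (a : Int) (answer : Int) : Int :=
  if a < 1 then 100000001
  else pvBloop a answer 1 0 (by norm_num)

-- ===== PRECONDITION & SPEC =====
-- Pre_ excludes only a = 0, on which Python A never returns (both while-loops diverge)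
def Pre_divide_by (a : Int) (answer : Int) : Prop := a ≠ 0
instance (a : Int) (answer : Int) : Decidable (Pre_divide_by a answer) := by unfold Pre_divide_by; infer_instance
def pvWitness_divide_by : Int × Int := (12, 0)
def Spec_divide_by (a : Int) (answer : Int) (out : Int) : Prop := out = divide_by_alt a answer
instance (a : Int) (answer : Int) (out : Int) : Decidable (Spec_divide_by a answer out) := by unfold Spec_divide_by; infer_instance

-- ===== CLAIM =====
def Claim_equal_divide_by : Prop := ∀ (a : Int) (answer : Int), Dom_divide_by a answer → Pre_divide_by a answer → Spec_divide_by a answer (divide_by a answer)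

-- ===== LEMMAS AND PROOFS =====

-- power-of-two bit test, backward direction
theorem pv_land_pow2 (i : ℕ) : 2 ^ i &&& (2 ^ i - 1) = 0 := by
  rw [Nat.land_comm, Nat.and_two_pow, Nat.testBit_two_pow_sub_one]
  simp

-- power-of-two bit test, forward direction
theorem pv_pow2_of_land : ∀ (n : ℕ), 0 < n → n &&& (n - 1) = 0 → ∃ i, n = 2 ^ i := by
  intro n
  induction n using Nat.strong_induction_on with
  | _ n ih =>
    intro hn h
    rcases Nat.even_or_odd n with he | ho
    · obtain ⟨m, hm⟩ := he
      have hmpos : 0 < m := by omega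
      have key := Nat.land_bit false m true (m - 1)
      have e1 : Nat.bit false m = n := by simp [Nat.bit]; omega
      have e2 : Nat.bit true (m - 1) = n - 1 := by simp [Nat.bit]; omega
      rw [e1, e2, h] at key
      have hz : m &&& (m - 1) = 0 := by
        have := key.symm
        simpa [Nat.bit] using this
      obtain ⟨i, hi⟩ := ih m (by omega) hmpos hz
      exact ⟨i + 1, by rw [show n = 2 * m by omega, hi]; ring⟩
    · obtain ⟨m, hm⟩ := ho
      rcases Nat.eq_zero_or_pos m with h0 | hmpos
      · exact ⟨0, by omega⟩
      · exfalso
        have key := Nat.land_bit true m false m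
        have e1 : Nat.bit true m = n := by simp [Nat.bit]; omega
        have e2 : Nat.bit false m = n - 1 := by simp [Nat.bit]; omega
        rw [e1, e2, h] at key
        have := key.symm
        simp [Nat.bit, Nat.and_self] at this
        omega

-- 3^t divides 2^i * 3^j * R exactly for t ≤ j
theorem pv_pow3_dvd (i j R t : ℕ) (h3 : ¬ 3 ∣ R) :
    3 ^ t ∣ 2 ^ i * 3 ^ j * R ↔ t ≤ j := by
  constructor
  · intro hd
    by_contra hlt
    have hj1 : 3 ^ (j + 1) ∣ 2 ^ i * 3 ^ j * R :=
      dvd_trans (pow_dvd_pow 3 (by omega)) hd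
    have hrw : 2 ^ i * 3 ^ j * R = 3 ^ j * (2 ^ i * R) := by ring
    have hrw2 : (3:ℕ) ^ (j + 1) = 3 ^ j * 3 := by ring
    rw [hrw, hrw2] at hj1
    have h3m : (3:ℕ) ∣ 2 ^ i * R :=
      (mul_dvd_mul_iff_left (pow_ne_zero j (by norm_num : (3:ℕ) ≠ 0))).mp hj1
    rcases (Nat.Prime.dvd_mul (by norm_num)).mp h3m with h32 | h3R
    · have := Nat.Prime.dvd_of_dvd_pow (by norm_num : Nat.Prime 3) h32
      omega
    · exact h3 h3R
  · intro ht
    exact dvd_trans (pow_dvd_pow 3 ht) ⟨2 ^ i * R, by ring⟩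

-- the quotient 2^i * 3^(j-t) * R is a power of two only at t = j with R = 1
theorem pv_quot_pow2 (i j R t k : ℕ) (h2 : ¬ 2 ∣ R) (h3 : ¬ 3 ∣ R) (ht : t ≤ j)
    (h : 2 ^ i * 3 ^ (j - t) * R = 2 ^ k) : t = j ∧ R = 1 := by
  have hcopR : Nat.Coprime R (2 ^ k) :=
    Nat.Coprime.pow_right k (((Nat.Prime.coprime_iff_not_dvd (by norm_num)).mpr h2).symm)
  have hR1 : R = 1 := hcopR.eq_one_of_dvd ⟨2 ^ i * 3 ^ (j - t), by rw [← h]; ring⟩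
  subst hR1
  have hdvd3 : 3 ^ (j - t) ∣ 2 ^ k := ⟨2 ^ i, by rw [← h]; ring⟩
  have hcop3 : Nat.Coprime (3 ^ (j - t)) (2 ^ k) :=
    Nat.Coprime.pow (j - t) k (by decide)
  have h31 : (3:ℕ) ^ (j - t) = 1 := hcop3.eq_one_of_dvd hdvd3
  rcases Nat.pow_eq_one.mp h31 with h | h
  · omega
  · omega

-- characterisation of A's first loop on positive input
theorem pv_A2_char : ∀ (n : ℕ) (a ans : Int), a.natAbs ≤ n → 0 < a →
    ∃ i : ℕ, a = 2 ^ i * (pvA2 a ans).1 ∧ (pvA2 a ans).2 = ans + i ∧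
      0 < (pvA2 a ans).1 ∧ ¬ (2:Int) ∣ (pvA2 a ans).1 := by
  intro n
  induction n with
  | zero => intro a ans h hpos; omega
  | succ n ih =>
    intro a ans h hpos
    by_cases h2 : PySem.Int.mod a 2 = 0
    · have ha : a ≠ 0 := ne_of_gt hpos
      rw [pvA2, dif_pos ⟨ha, h2⟩]
      rw [PySem.Int.mod_eq_emod_of_pos (by norm_num)] at h2
      obtain ⟨c, hc⟩ := Int.dvd_of_emod_eq_zero h2
      have hfd : PySem.Int.floordiv a 2 = c := by
        rw [PySem.Int.floordiv_eq_ediv_of_pos (by norm_num), hc,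
          Int.mul_ediv_cancel_left c (by norm_num)]
      rw [hfd]
      have hcpos : 0 < c := by omega
      obtain ⟨i, e1, e2, e3, e4⟩ := ih c (ans + 1) (by omega) hcpos
      refine ⟨i + 1, ?_, ?_, e3, e4⟩
      · rw [hc]; conv_lhs => rw [e1]
        ring
      · rw [e2]; push_cast; ring
    · rw [pvA2, dif_neg (by tauto)]
      refine ⟨0, by simp, by simp, hpos, ?_⟩
      intro hd
      exact h2 (by rw [PySem.Int.mod_eq_emod_of_pos (by norm_num)]; exact Int.emod_eq_zero_of_dvd hd)

-- characterisation of A's second loop on positive input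
theorem pv_A3_char : ∀ (n : ℕ) (a ans : Int), a.natAbs ≤ n → 0 < a →
    ∃ j : ℕ, a = 3 ^ j * (pvA3 a ans).1 ∧ (pvA3 a ans).2 = ans + j ∧
      0 < (pvA3 a ans).1 ∧ ¬ (3:Int) ∣ (pvA3 a ans).1 := by
  intro n
  induction n with
  | zero => intro a ans h hpos; omega
  | succ n ih =>
    intro a ans h hpos
    by_cases h3 : PySem.Int.mod a 3 = 0
    · have ha : a ≠ 0 := ne_of_gt hpos
      rw [pvA3, dif_pos ⟨ha, h3⟩]
      rw [PySem.Int.mod_eq_emod_of_pos (by norm_num)] at h3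
      obtain ⟨c, hc⟩ := Int.dvd_of_emod_eq_zero h3
      have hfd : PySem.Int.floordiv a 3 = c := by
        rw [PySem.Int.floordiv_eq_ediv_of_pos (by norm_num), hc,
          Int.mul_ediv_cancel_left c (by norm_num)]
      rw [hfd]
      have hcpos : 0 < c := by omega
      obtain ⟨j, e1, e2, e3, e4⟩ := ih c (ans + 1) (by omega) hcpos
      refine ⟨j + 1, ?_, ?_, e3, e4⟩
      · rw [hc]; conv_lhs => rw [e1]
        ring
      · rw [e2]; push_cast; ring
    · rw [pvA3, dif_neg (by tauto)]
      refine ⟨0, by simp, by simp, hpos, ?_⟩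
      intro hd
      exact h3 (by rw [PySem.Int.mod_eq_emod_of_pos (by norm_num)]; exact Int.emod_eq_zero_of_dvd hd)

-- A's loops keep a negative input negative
theorem pv_A2_neg : ∀ (n : ℕ) (a ans : Int), a.natAbs ≤ n → a < 0 → (pvA2 a ans).1 < 0 := by
  intro n
  induction n with
  | zero => intro a ans h hneg; omega
  | succ n ih =>
    intro a ans h hneg
    by_cases h2 : PySem.Int.mod a 2 = 0
    · rw [pvA2, dif_pos ⟨by omega, h2⟩]
      rw [PySem.Int.mod_eq_emod_of_pos (by norm_num)] at h2
      obtain ⟨c, hc⟩ := Int.dvd_of_emod_eq_zero h2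
      have hfd : PySem.Int.floordiv a 2 = c := by
        rw [PySem.Int.floordiv_eq_ediv_of_pos (by norm_num), hc,
          Int.mul_ediv_cancel_left c (by norm_num)]
      rw [hfd]
      exact ih c (ans + 1) (by omega) (by omega)
    · rw [pvA2, dif_neg (by tauto)]
      exact hneg

theorem pv_A3_neg : ∀ (n : ℕ) (a ans : Int), a.natAbs ≤ n → a < 0 → (pvA3 a ans).1 < 0 := by
  intro n
  induction n with
  | zero => intro a ans h hneg; omega
  | succ n ih =>
    intro a ans h hneg
    by_cases h3 : PySem.Int.mod a 3 = 0
    · rw [pvA3, dif_pos ⟨by omega, h3⟩]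
      rw [PySem.Int.mod_eq_emod_of_pos (by norm_num)] at h3
      obtain ⟨c, hc⟩ := Int.dvd_of_emod_eq_zero h3
      have hfd : PySem.Int.floordiv a 3 = c := by
        rw [PySem.Int.floordiv_eq_ediv_of_pos (by norm_num), hc,
          Int.mul_ediv_cancel_left c (by norm_num)]
      rw [hfd]
      exact ih c (ans + 1) (by omega) (by omega)
    · rw [pvA3, dif_neg (by tauto)]
      exact hneg

-- the division step B's loop takes when 3^t divides a
theorem pv_floordiv_step (i j R t : ℕ) (ht : t ≤ j) :
    PySem.Int.floordiv ((2 ^ i * 3 ^ j * R : ℕ) : Int) ((3:Int) ^ t) =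
      ((2 ^ i * 3 ^ (j - t) * R : ℕ) : Int) := by
  have hsplit : (2 ^ i * 3 ^ j * R : ℕ) = 3 ^ t * (2 ^ i * 3 ^ (j - t) * R) := by
    have h3 : (3:ℕ) ^ t * 3 ^ (j - t) = 3 ^ j := by
      rw [← pow_add]; congr 1; omega
    calc (2 ^ i * 3 ^ j * R : ℕ) = (3 ^ t * 3 ^ (j - t)) * 2 ^ i * R := by rw [h3]; ring
    _ = 3 ^ t * (2 ^ i * 3 ^ (j - t) * R) := by ring
  rw [PySem.Int.floordiv_eq_ediv_of_pos (by positivity), hsplit]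
  push_cast
  rw [Int.mul_ediv_cancel_left _ (by positivity)]

-- B's loop on a = 2^i * 3^j * R, called with p = 3^t, j-argument t
theorem pv_Bloop_char : ∀ (fuel : ℕ) (i j R : ℕ) (ans : Int) (t : ℕ) (p jI : Int)
    (hp : 0 < p), p = 3 ^ t → jI = (t : Int) →
    0 < R → ¬ 2 ∣ R → ¬ 3 ∣ R →
    ((2 ^ i * 3 ^ j * R : ℕ) : Int) + 1 - p ≤ fuel →
    pvBloop ((2 ^ i * 3 ^ j * R : ℕ) : Int) ans p jI hp =
      if R = 1 ∧ t ≤ j then ans + i + j else 100000001 := by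
  intro fuel
  induction fuel with
  | zero =>
    intro i j R ans t p jI hp hpp hjj hR h2 h3 hb
    subst hpp; subst hjj
    have hgt : ¬ ((3:Int) ^ t ≤ ((2 ^ i * 3 ^ j * R : ℕ) : Int)) := by omega
    rw [pvBloop, if_neg hgt, if_neg]
    rintro ⟨hR1, htj⟩
    apply hgt
    subst hR1
    have hle : (3:ℕ) ^ t ≤ 2 ^ i * 3 ^ j * 1 := by
      calc (3:ℕ) ^ t ≤ 3 ^ j := Nat.pow_le_pow_right (by norm_num) htj
      _ = 1 * 3 ^ j * 1 := by ring
      _ ≤ 2 ^ i * 3 ^ j * 1 := Nat.mul_le_mul (Nat.mul_le_mul Nat.one_le_two_pow le_rfl) le_rfl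
    calc (3:Int) ^ t = ((3 ^ t : ℕ) : Int) := by push_cast; ring
    _ ≤ _ := by exact_mod_cast hle
  | succ fuel ih =>
    intro i j R ans t p jI hp hpp hjj hR h2 h3 hb
    subst hpp; subst hjj
    by_cases hguard : (3:Int) ^ t ≤ ((2 ^ i * 3 ^ j * R : ℕ) : Int)
    · rw [pvBloop, if_pos hguard]
      have hmod_iff : PySem.Int.mod ((2 ^ i * 3 ^ j * R : ℕ) : Int) ((3:Int) ^ t) = 0 ↔ t ≤ j := by
        rw [PySem.Int.mod_eq_emod_of_pos (by positivity)]
        constructor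
        · intro hm
          have hd := Int.dvd_of_emod_eq_zero hm
          have hdnat : (3:ℕ) ^ t ∣ 2 ^ i * 3 ^ j * R := by
            have : ((3 ^ t : ℕ) : Int) ∣ ((2 ^ i * 3 ^ j * R : ℕ) : Int) := by
              push_cast
              exact hd
            exact_mod_cast this
          exact (pv_pow3_dvd i j R t h3).mp hdnat
        · intro htj
          apply Int.emod_eq_zero_of_dvd
          have hdnat := (pv_pow3_dvd i j R t h3).mpr htj
          have : ((3 ^ t : ℕ) : Int) ∣ ((2 ^ i * 3 ^ j * R : ℕ) : Int) := by exact_mod_cast hdnat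
          rw [Nat.cast_pow] at this
          exact_mod_cast this
      by_cases hcond : PySem.Int.mod ((2 ^ i * 3 ^ j * R : ℕ) : Int) ((3:Int) ^ t) = 0 ∧
          pyAndPred (PySem.Int.floordiv ((2 ^ i * 3 ^ j * R : ℕ) : Int) ((3:Int) ^ t)) = 0
      · -- the quotient is a power of two: t = j and R = 1
        obtain ⟨hm, htest⟩ := hcond
        have htj : t ≤ j := hmod_iff.mp hm
        rw [pv_floordiv_step i j R t htj] at htest
        have hKpos : 0 < 2 ^ i * 3 ^ (j - t) * R := by positivity
        have htestN : (2 ^ i * 3 ^ (j - t) * R) &&& (2 ^ i * 3 ^ (j - t) * R - 1) = 0 := by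
          have : pyAndPred ((2 ^ i * 3 ^ (j - t) * R : ℕ) : Int) = 0 := htest
          unfold pyAndPred at this
          rw [Int.toNat_natCast] at this
          exact_mod_cast this
        obtain ⟨k, hk⟩ := pv_pow2_of_land _ hKpos htestN
        obtain ⟨htj', hR1⟩ := pv_quot_pow2 i j R t k h2 h3 htj hk
        rw [if_pos ⟨hm, by rw [pv_floordiv_step i j R t htj]; exact htest⟩,
          if_pos ⟨hR1, htj⟩, pv_floordiv_step i j R t htj]
        subst hR1 htj'
        have : (2 ^ i * 3 ^ (t - t) * 1 : ℕ) = 2 ^ i := by simp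
        rw [this]
        unfold pyBitLength
        rw [Int.natAbs_natCast]
        rw [if_neg (by positivity), Nat.log2_two_pow]
        ring
      · rw [if_neg hcond]
        rw [ih i j R ans (t + 1) ((3:Int) ^ t * 3) ((t : Int) + 1) (by positivity)
          (by ring) (by push_cast; ring) hR h2 h3 (by
            have h1 : (1:Int) ≤ 3 ^ t := one_le_pow₀ (by norm_num)
            omega)]
        -- the two if-conditions agree given the test failed
        rcases lt_trichotomy t j with hlt | heq | hgt'
        · congr 1
          simp only [eq_iff_iff]
          constructor
          · rintro ⟨hR1, _⟩; exact ⟨hR1, by omega⟩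
          · rintro ⟨hR1, _⟩; exact ⟨hR1, by omega⟩
        · -- t = j: the condition at t must be false, i.e. R ≠ 1
          subst heq
          rw [if_neg (by omega : ¬ (R = 1 ∧ t + 1 ≤ t)), if_neg]
          rintro ⟨hR1, htj⟩
          apply hcond
          subst hR1
          refine ⟨hmod_iff.mpr le_rfl, ?_⟩
          rw [pv_floordiv_step i t 1 t le_rfl]
          unfold pyAndPred
          rw [Int.toNat_natCast]
          have : (2 ^ i * 3 ^ (t - t) * 1 : ℕ) = 2 ^ i := by simp
          rw [this]
          exact_mod_cast pv_land_pow2 i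
        · rw [if_neg (by omega : ¬ (R = 1 ∧ t ≤ j)), if_neg (by omega : ¬ (R = 1 ∧ t + 1 ≤ j))]
    · rw [pvBloop, if_neg hguard, if_neg]
      rintro ⟨hR1, htj⟩
      apply hguard
      subst hR1
      have hle : (3:ℕ) ^ t ≤ 2 ^ i * 3 ^ j * 1 := by
        calc (3:ℕ) ^ t ≤ 3 ^ j := Nat.pow_le_pow_right (by norm_num) htj
        _ = 1 * 3 ^ j * 1 := by ring
        _ ≤ 2 ^ i * 3 ^ j * 1 := Nat.mul_le_mul (Nat.mul_le_mul Nat.one_le_two_pow le_rfl) le_rfl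
      calc (3:Int) ^ t = ((3 ^ t : ℕ) : Int) := by push_cast; ring
      _ ≤ _ := by exact_mod_cast hle

-- ===== VERDICT =====
theorem divide_by_spec : Claim_equal_divide_by := by
  intro a ans _ hne
  simp only [Spec_divide_by, divide_by, divide_by_alt]
  rcases lt_trichotomy a 0 with hneg | hz | hpos
  · have h2 := pv_A2_neg a.natAbs a ans le_rfl hneg
    have h3 := pv_A3_neg (pvA2 a ans).1.natAbs (pvA2 a ans).1 (pvA2 a ans).2 le_rfl h2
    rw [if_pos (by omega : (pvA3 (pvA2 a ans).1 (pvA2 a ans).2).1 ≠ 1),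
      if_pos (by omega : a < 1)]
  · exact absurd hz hne
  · obtain ⟨i, e1, e2, hb, hodd⟩ := pv_A2_char a.natAbs a ans le_rfl hpos
    obtain ⟨j, f1, f2, hr, h3r⟩ :=
      pv_A3_char (pvA2 a ans).1.natAbs (pvA2 a ans).1 (pvA2 a ans).2 le_rfl hb
    have h2r : ¬ (2:Int) ∣ (pvA3 (pvA2 a ans).1 (pvA2 a ans).2).1 := by
      intro hd
      exact hodd (f1 ▸ Dvd.dvd.mul_left hd _)
    set r := (pvA3 (pvA2 a ans).1 (pvA2 a ans).2).1 with hrdef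
    have hM : a = ((2 ^ i * 3 ^ j * r.toNat : ℕ) : Int) := by
      push_cast [Int.toNat_of_nonneg hr.le]
      rw [e1, f1]; ring
    have hRpos : 0 < r.toNat := by omega
    have hR2 : ¬ 2 ∣ r.toNat := by
      intro hd
      apply h2r
      have : ((2:ℕ) : Int) ∣ ((r.toNat : ℕ) : Int) := Int.natCast_dvd_natCast.mpr hd
      rwa [Int.toNat_of_nonneg hr.le] at this
    have hR3 : ¬ 3 ∣ r.toNat := by
      intro hd
      apply h3r
      have : ((3:ℕ) : Int) ∣ ((r.toNat : ℕ) : Int) := Int.natCast_dvd_natCast.mpr hd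
      rwa [Int.toNat_of_nonneg hr.le] at this
    rw [if_neg (by omega : ¬ a < 1)]
    conv_rhs => rw [hM]
    rw [pv_Bloop_char (2 ^ i * 3 ^ j * r.toNat) i j r.toNat ans 0 1 0
      (by norm_num) (by norm_num) (by norm_num) hRpos hR2 hR3 (by omega)]
    have hiff : r = 1 ↔ r.toNat = 1 := by omega
    by_cases hr1 : r = 1
    · rw [if_neg (by simp [hr1]), if_pos ⟨hiff.mp hr1, Nat.zero_le j⟩, f2, e2]
    · rw [if_pos (by simpa using hr1), if_neg]
      rintro ⟨hh, _⟩
      exact hr1 (hiff.mpr hh)
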